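-- pv_equiv track=rewrite | github.com/keshav2905/superwings_a4 | lang_python/TaxiCharges.py | calculateCharges
-- ===== SOURCE A (Python) =====
-- def calculateCharges(distance):
--
--     charges = 0
--
--     while distance > 15:
--         charges = charges + 15
--         distance = distance - 1
--
--     while distance > 5:
--         charges = charges + 18
--         distance = distance - 1
--
--     while distance > 2:
--         charges = charges + 20
--         distance = distance - 1
--
--     charges = charges + 50
--
--     return charges
-- ===== SOURCE B (Python) =====
-- def calculateCharges(distance):
--     # Closed-form tiered fare: O(1) arithmetic instead of per-kilometre loops.
--     if distance > 15:
--         return 15 * (distance - 15) + 180 + 60 + 50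
--     if distance > 5:
--         return 18 * (distance - 5) + 60 + 50
--     if distance > 2:
--         return 20 * (distance - 2) + 50
--     return 50
-- ===== Notes on version B (the rewrite author's own statement) =====
-- stated objective: faster
-- what changed: Replaced the three per-kilometre decrement loops with a closed-form if-chain multiplying each tier's rate by its kilometre count.
import Mathlib
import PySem

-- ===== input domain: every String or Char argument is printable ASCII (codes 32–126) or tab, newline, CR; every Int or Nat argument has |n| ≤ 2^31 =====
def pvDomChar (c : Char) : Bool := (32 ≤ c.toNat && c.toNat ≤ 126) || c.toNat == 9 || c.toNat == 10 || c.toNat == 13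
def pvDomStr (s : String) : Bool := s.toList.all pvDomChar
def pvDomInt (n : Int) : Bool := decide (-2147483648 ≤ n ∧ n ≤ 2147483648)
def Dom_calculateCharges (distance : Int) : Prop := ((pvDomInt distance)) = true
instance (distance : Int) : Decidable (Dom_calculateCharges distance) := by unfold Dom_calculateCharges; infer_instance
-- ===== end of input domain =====

-- B replaces A's three per-kilometre decrement loops with closed-form tier arithmetic (faster).


-- ===== PORT A =====
-- third while loop, then the final `charges + 50`
def pvLoop3 (charges distance : Int) : Int :=
  if distance > 2 then pvLoop3 (charges + 20) (distance - 1) else charges + 50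
termination_by distance.toNat
decreasing_by omega

-- second while loop
def pvLoop2 (charges distance : Int) : Int :=
  if distance > 5 then pvLoop2 (charges + 18) (distance - 1) else pvLoop3 charges distance
termination_by distance.toNat
decreasing_by omega

-- first while loop
def pvLoop1 (charges distance : Int) : Int :=
  if distance > 15 then pvLoop1 (charges + 15) (distance - 1) else pvLoop2 charges distance
termination_by distance.toNat
decreasing_by omega

def calculateCharges (distance : Int) : Int := pvLoop1 0 distance

-- ===== PORT B =====
def calculateCharges_alt (distance : Int) : Int :=
  if distance > 15 then 15 * (distance - 15) + 180 + 60 + 50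
  else if distance > 5 then 18 * (distance - 5) + 60 + 50
  else if distance > 2 then 20 * (distance - 2) + 50
  else 50

-- ===== PRECONDITION & SPEC =====
def Spec_calculateCharges (distance : Int) (out : Int) : Prop := out = calculateCharges_alt distance
instance (distance : Int) (out : Int) : Decidable (Spec_calculateCharges distance out) := by unfold Spec_calculateCharges; infer_instance

-- ===== CLAIM (what is proved, stated in full; the proofs are below) =====
def Claim_equal_calculateCharges : Prop := ∀ (distance : Int), Dom_calculateCharges distance → Spec_calculateCharges distance (calculateCharges distance)

-- ===== LEMMAS AND PROOFS =====
theorem pvLoop3_eq (charges distance : Int) :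
    pvLoop3 charges distance = charges + 20 * max (distance - 2) 0 + 50 := by
  unfold pvLoop3
  split
  · rw [pvLoop3_eq (charges + 20) (distance - 1)]; omega
  · omega
termination_by distance.toNat
decreasing_by omega

theorem pvLoop2_eq (charges distance : Int) :
    pvLoop2 charges distance = charges + 18 * max (distance - 5) 0 + 20 * max (min distance 5 - 2) 0 + 50 := by
  unfold pvLoop2
  split
  · rw [pvLoop2_eq (charges + 18) (distance - 1)]; omega
  · rw [pvLoop3_eq]; omega
termination_by distance.toNat
decreasing_by omega

theorem pvLoop1_eq (charges distance : Int) :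
    pvLoop1 charges distance = charges + 15 * max (distance - 15) 0 + 18 * max (min distance 15 - 5) 0 + 20 * max (min distance 5 - 2) 0 + 50 := by
  unfold pvLoop1
  split
  · rw [pvLoop1_eq (charges + 15) (distance - 1)]; omega
  · rw [pvLoop2_eq]; omega
termination_by distance.toNat
decreasing_by omega

-- ===== VERDICT (by name: the statement is the Claim_ definition above) =====
theorem calculateCharges_spec : Claim_equal_calculateCharges := by
  intro d _
  unfold Spec_calculateCharges calculateCharges calculateCharges_alt
  rw [pvLoop1_eq]
  split_ifs <;> omega
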